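-- pv_equiv track=rewrite | github.com/Honkajo/sustainability-project | code_examples/nested_loops_random_programms/nested_loop7.py | function_p_f_z
-- ===== SOURCE A (Python) =====
-- def function_p_f_z(n):
--     factors = []
--     for i in range(2, n + 1):
--         for j in range(2, i + 1):
--             for k in range(2, j + 1):
--                 if i % j == 0 and n % i == 0:
--                     factors.append(i)
--                     break
--     return factors
-- ===== SOURCE B (Python) =====
-- def function_p_f_z(n):
--     factors = []
--     for i in range(2, n + 1):
--         if n % i == 0:
--             cnt = sum(1 for j in range(2, i + 1) if i % j == 0)
--             factors += [i] * cnt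
--     return factors
-- ===== Notes on version B (the rewrite author's own statement) =====
-- stated objective: faster
-- what changed: B replaces A's triple nested loop (whose innermost k-loop only re-tests a k-independent condition) by a single pass over 2..n that, for each divisor i of n, appends i once per nontrivial divisor of i, counted directly.
import Mathlib
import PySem

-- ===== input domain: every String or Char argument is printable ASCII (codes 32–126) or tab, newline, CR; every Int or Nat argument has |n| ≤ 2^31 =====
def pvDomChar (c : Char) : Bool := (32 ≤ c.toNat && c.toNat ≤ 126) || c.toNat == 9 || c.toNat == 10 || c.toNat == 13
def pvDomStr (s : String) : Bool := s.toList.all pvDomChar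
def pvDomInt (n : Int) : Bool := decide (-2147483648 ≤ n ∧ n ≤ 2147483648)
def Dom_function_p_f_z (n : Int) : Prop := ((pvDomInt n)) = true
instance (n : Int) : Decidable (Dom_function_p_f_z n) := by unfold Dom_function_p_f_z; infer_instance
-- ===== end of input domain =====

-- B collapses A's O(n^3) triple loop to one pass over 2..n appending each divisor i of n
-- once per nontrivial divisor of i (objective: faster, asymptotic).

-- ===== PORT A =====
-- the innermost 'for k' loop with 'break': state = (factors, broken-flag)
def pvKStep (n i j : Int) : List Int × Bool → Int → List Int × Bool :=
  fun st _k =>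
    if st.2 then st
    else if PySem.Int.mod i j == 0 && PySem.Int.mod n i == 0 then (st.1 ++ [i], true)
    else st

def function_p_f_z (n : Int) : List Int :=
  (PySem.List.pyRange 2 (n + 1) 1).foldl (fun factors i =>
    (PySem.List.pyRange 2 (i + 1) 1).foldl (fun factors j =>
      ((PySem.List.pyRange 2 (j + 1) 1).foldl (pvKStep n i j) (factors, false)).1)
      factors)
    []

-- ===== PORT B =====
def function_p_f_z_alt (n : Int) : List Int :=
  (PySem.List.pyRange 2 (n + 1) 1).foldl (fun factors i =>
    if PySem.Int.mod n i == 0 then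
      factors ++ List.replicate
        ((PySem.List.pyRange 2 (i + 1) 1).countP (fun j => PySem.Int.mod i j == 0)) i
    else factors)
    []

-- ===== PRECONDITION & SPEC =====
def Spec_function_p_f_z (n : Int) (out : List Int) : Prop := out = function_p_f_z_alt n
instance (n : Int) (out : List Int) : Decidable (Spec_function_p_f_z n out) := by unfold Spec_function_p_f_z; infer_instance

-- ===== CLAIM (what is proved, stated in full; the proofs are below) =====
def Claim_equal_function_p_f_z : Prop := ∀ (n : Int), Dom_function_p_f_z n → Spec_function_p_f_z n (function_p_f_z n)

-- ===== LEMMAS AND PROOFS =====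

-- once the break has fired, the k-loop changes nothing
theorem pvKStep_broken (n i j : Int) (l : List Int) (xs : List Int) :
    l.foldl (pvKStep n i j) (xs, true) = (xs, true) := by
  induction l with
  | nil => rfl
  | cons a t ih => simpa [pvKStep] using ih

-- the condition does not depend on k: if it is false the k-loop is a no-op
theorem pvKStep_false (n i j : Int)
    (hc : (PySem.Int.mod i j == 0 && PySem.Int.mod n i == 0) = false)
    (l : List Int) (xs : List Int) :
    l.foldl (pvKStep n i j) (xs, false) = (xs, false) := by
  induction l with
  | nil => rfl
  | cons a t ih => simpa [pvKStep, hc] using ih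

-- the k-loop appends i exactly when the (k-independent) condition holds, provided 2 ≤ j
theorem pvKLoop_eval (n i j : Int) (h2 : (2 : Int) ≤ j) (xs : List Int) :
    ((PySem.List.pyRange 2 (j + 1) 1).foldl (pvKStep n i j) (xs, false)).1
      = if PySem.Int.mod i j == 0 && PySem.Int.mod n i == 0 then xs ++ [i] else xs := by
  rw [PySem.List.pyRange_one_cons (by omega : (2 : Int) < j + 1)]
  cases hc : (PySem.Int.mod i j == 0 && PySem.Int.mod n i == 0) with
  | false => simp [pvKStep_false n i j hc]
  | true => simp [List.foldl_cons, pvKStep, hc, pvKStep_broken]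

-- A's body for one i equals B's body for that i, for every accumulator
theorem pvStep_eq (n i : Int) (xs : List Int) :
    (PySem.List.pyRange 2 (i + 1) 1).foldl (fun factors j =>
        ((PySem.List.pyRange 2 (j + 1) 1).foldl (pvKStep n i j) (factors, false)).1) xs
      = (if PySem.Int.mod n i == 0 then
          xs ++ List.replicate
            ((PySem.List.pyRange 2 (i + 1) 1).countP (fun j => PySem.Int.mod i j == 0)) i
        else xs) := by
  have h1 :
      (PySem.List.pyRange 2 (i + 1) 1).foldl (fun factors j =>
          ((PySem.List.pyRange 2 (j + 1) 1).foldl (pvKStep n i j) (factors, false)).1) xs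
        = (PySem.List.pyRange 2 (i + 1) 1).foldl (fun factors j =>
            if PySem.Int.mod i j == 0 && PySem.Int.mod n i == 0 then factors ++ [i]
            else factors) xs := by
    apply PySem.List.foldl_congr_mem
    intro acc j hj
    exact pvKLoop_eval n i j ((PySem.List.mem_pyRange_one.mp hj).1) acc
  rw [h1, PySem.List.foldl_append_if]
  cases hn : (PySem.Int.mod n i == 0) with
  | false => simp
  | true =>
    simp only [if_pos, Bool.and_true]
    rw [List.map_const', ← List.countP_eq_length_filter]

-- ===== VERDICT (by name: the statement is the Claim_ definition above) =====
theorem function_p_f_z_spec : Claim_equal_function_p_f_z := by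
  intro n _
  unfold Spec_function_p_f_z function_p_f_z function_p_f_z_alt
  have h : (fun (factors : List Int) (i : Int) =>
        ((PySem.List.pyRange 2 (i + 1) 1).foldl (fun factors j =>
          ((PySem.List.pyRange 2 (j + 1) 1).foldl (pvKStep n i j) (factors, false)).1) factors))
      = (fun (factors : List Int) (i : Int) =>
          if PySem.Int.mod n i == 0 then
            factors ++ List.replicate
              ((PySem.List.pyRange 2 (i + 1) 1).countP (fun j => PySem.Int.mod i j == 0)) i
          else factors) := by
    funext xs i
    exact pvStep_eq n i xs
  rw [h]
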